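-- pv_equiv track=rewrite | github.com/nattyleyo/Leetcode-A2SV | week-3/minimum-number-of-operations-to-move-all-balls-to-each-box.py | minOperations
-- ===== SOURCE A (Python) =====
-- from typing import List
--
-- def minOperations(boxes: str) -> List[int]:
--     ans=[]
--     n=len(boxes)
--     for i in range(n):
--         move=0
--         for j in range(n):
--             move+=abs(i-j)
--             if move<1 or boxes[j]=='0':
--                 move-=abs(i-j)
--         ans.append(move)
--     return ans
-- ===== SOURCE B (Python) =====
-- from typing import List
--
-- def minOperations(boxes: str) -> List[int]:
--     # One linear pass in each direction: `left[i]` is the cost of moving every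
--     # ball left of i to i, `right` the same on the reversed string.
--     def pass_costs(chars):
--         costs = []
--         cnt = 0
--         cost = 0
--         for ch in chars:
--             costs.append(cost)
--             cnt += ch != '0'
--             cost += cnt
--         return costs
--     left = pass_costs(boxes)
--     right = pass_costs(boxes[::-1])
--     right.reverse()
--     return [l + r for l, r in zip(left, right)]
-- ===== Notes on version B (the rewrite author's own statement) =====
-- stated objective: faster
-- what changed: Replaced the quadratic per-box rescan of all balls by two linear prefix passes that carry a running ball count and running move cost (forward and over the reversed string), combining the two costs per index.
import Mathlib
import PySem

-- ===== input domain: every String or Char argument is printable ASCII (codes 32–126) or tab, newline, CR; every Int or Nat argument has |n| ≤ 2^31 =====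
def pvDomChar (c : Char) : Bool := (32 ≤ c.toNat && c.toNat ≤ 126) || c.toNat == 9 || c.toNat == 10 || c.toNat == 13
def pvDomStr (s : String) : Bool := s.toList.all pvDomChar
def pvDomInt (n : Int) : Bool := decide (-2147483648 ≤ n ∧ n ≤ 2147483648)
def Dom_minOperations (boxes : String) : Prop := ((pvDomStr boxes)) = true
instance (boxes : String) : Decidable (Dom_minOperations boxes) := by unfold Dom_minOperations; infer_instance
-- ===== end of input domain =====

-- B replaces A's quadratic per-box rescan by two linear prefix passes (forward and reversed), combined per index.


-- ===== PORT A =====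
def minOperations (boxes : String) : List Int :=
  let n : Int := PySem.Str.len boxes
  (PySem.List.pyRange 0 n 1).foldl (fun ans i =>
    ans ++ [(PySem.List.pyRange 0 n 1).foldl (fun move j =>
        let move' := move + |i - j|
        if move' < 1 ∨ PySem.Str.pyGet? boxes j = some '0' then move' - |i - j| else move') 0]) []

-- ===== PORT B =====
-- one pass of Source B's pass_costs: carries (cnt, cost), emits cost before each update
def passCosts : List Char → Int → Int → List Int
  | [], _, _ => []
  | ch :: rest, cnt, cost =>
      let cnt' := cnt + (if ch ≠ '0' then 1 else 0)
      cost :: passCosts rest cnt' (cost + cnt')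

def minOperations_alt (boxes : String) : List Int :=
  let cs := boxes.toList
  let left := passCosts cs 0 0
  let right := passCosts cs.reverse 0 0
  List.zipWith (· + ·) left right.reverse

-- ===== PRECONDITION & SPEC =====
def Spec_minOperations (boxes : String) (out : List Int) : Prop := out = minOperations_alt boxes
instance (boxes : String) (out : List Int) : Decidable (Spec_minOperations boxes out) := by unfold Spec_minOperations; infer_instance

-- ===== CLAIM (what is proved, stated in full; the proofs are below) =====
def Claim_equal_minOperations : Prop := ∀ (boxes : String), Dom_minOperations boxes → Spec_minOperations boxes (minOperations boxes)

-- ===== LEMMAS AND PROOFS =====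

-- ball indicator: 1 for any character other than '0'
def bc (c : Char) : Int := if c = '0' then 0 else 1

lemma bc_nonneg (c : Char) : 0 ≤ bc c := by unfold bc; split <;> omega

-- the common specification: total distance from position i to every ball
def pvS (cs : List Char) (i : Nat) : Int :=
  ∑ j ∈ Finset.range cs.length, bc (cs.getD j '0') * |(i : Int) - (j : Int)|

lemma sum_coeff_nonneg (g : Nat → Int) (hg : ∀ k, 0 ≤ g k) (m : Nat) (i : Int) :
    0 ≤ ∑ j ∈ Finset.range m, g j * |i - (j : Int)| := by
  apply Finset.sum_nonneg
  intro j _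
  exact mul_nonneg (hg j) (abs_nonneg _)

-- A's inner-loop step adds |i-j| exactly when boxes[j] ≠ '0' (the move<1 branch never changes the value)
lemma step_eq (S a : Int) (hS : 0 ≤ S) (ha : 0 ≤ a) (c : Char) :
    (if S + a < 1 ∨ some c = some '0' then S + a - a else S + a) = S + bc c * a := by
  unfold bc
  by_cases hc : c = '0'
  · simp [hc]
  · simp [hc]
    omega

lemma innerA (boxes : String) (i : Int) (m : Nat) (hm : m ≤ boxes.toList.length) :
    (PySem.List.pyRange 0 (m : Int) 1).foldl (fun move j =>
        let move' := move + |i - j|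
        if move' < 1 ∨ PySem.Str.pyGet? boxes j = some '0' then move' - |i - j| else move') 0
    = ∑ j ∈ Finset.range m, bc (boxes.toList.getD j '0') * |i - (j : Int)| := by
  induction m with
  | zero => simp [PySem.List.pyRange_one_eq_nil]
  | succ m ih =>
    have hm' : m ≤ boxes.toList.length := Nat.le_of_succ_le hm
    have hlt : m < boxes.toList.length := hm
    have hr : PySem.List.pyRange 0 ((m+1 : Nat) : Int) 1
        = PySem.List.pyRange 0 (m : Nat) 1 ++ [(m : Int)] := by
      push_cast
      exact PySem.List.pyRange_one_succ_right (by positivity)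
    rw [hr, List.foldl_append, ih hm']
    have hget : PySem.Str.pyGet? boxes ((m : Nat) : Int) = some (boxes.toList.getD m '0') := by
      rw [PySem.Str.pyGet?_natCast]
      rw [List.getElem?_eq_getElem hlt, List.getD_eq_getElem _ _ hlt]
    rw [Finset.sum_range_succ]
    have hS : 0 ≤ ∑ j ∈ Finset.range m, bc (boxes.toList.getD j '0') * |i - (j : Int)| :=
      sum_coeff_nonneg _ (fun k => bc_nonneg _) m i
    simp only [List.foldl_cons, List.foldl_nil, hget]
    exact step_eq _ _ hS (abs_nonneg _) _

lemma A_eq (boxes : String) :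
    minOperations boxes = (List.range boxes.toList.length).map (fun k => pvS boxes.toList k) := by
  have hlen : PySem.Str.len boxes = ((boxes.toList.length : Nat) : Int) := by
    simp [PySem.Str.len_eq]
  unfold minOperations
  simp only [hlen]
  refine (PySem.List.foldl_append_singleton_eq_map _ _ []).trans ?_
  rw [List.nil_append]
  apply List.ext_getElem
  · simp [PySem.List.length_pyRange_one]
  · intro k h1 h2
    rw [List.getElem_map, List.getElem_map, PySem.List.getElem_pyRange_one]
    rw [show (0 : Int) + k = ((k : Nat) : Int) by ring]
    simpa [pvS, List.getElem_range] using innerA boxes (k : Int) boxes.toList.length le_rfl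

lemma passCosts_length (cs : List Char) (cnt cost : Int) :
    (passCosts cs cnt cost).length = cs.length := by
  induction cs generalizing cnt cost with
  | nil => rfl
  | cons c rest ih => simp [passCosts, ih]

lemma passCosts_getElem (cs : List Char) (cnt cost : Int) (i : Nat) (h : i < cs.length) :
    (passCosts cs cnt cost)[i]'(by rw [passCosts_length]; exact h)
    = cost + (i : Int) * cnt + ∑ k ∈ Finset.range i, ((i : Int) - (k : Int)) * bc (cs.getD k '0') := by
  induction cs generalizing i cnt cost with
  | nil => simp at h
  | cons c rest ih =>
    cases i with
    | zero => simp [passCosts]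
    | succ j =>
      have hj : j < rest.length := by simpa using h
      have hstep : (passCosts (c :: rest) cnt cost)[j+1]'(by rw [passCosts_length]; exact h)
          = (passCosts rest (cnt + (if c ≠ '0' then 1 else 0)) (cost + (cnt + (if c ≠ '0' then 1 else 0))))[j]'(by rw [passCosts_length]; exact hj) := by
        simp [passCosts]
      rw [hstep, ih _ _ j hj]
      rw [Finset.sum_range_succ']
      simp only [List.getD_cons_succ, List.getD_cons_zero]
      push_cast
      have hb : bc c = if c ≠ '0' then 1 else 0 := by unfold bc; split <;> simp_all
      rw [show (∑ k ∈ Finset.range j, ((j : Int) + 1 - ((k : Int) + 1)) * bc (rest.getD k '0'))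
            = ∑ k ∈ Finset.range j, ((j : Int) - (k : Int)) * bc (rest.getD k '0') from
          Finset.sum_congr rfl (fun k _ => by ring_nf)]
      rw [← hb]
      ring

-- splitting the distance sum at i and reflecting the right half (pure arithmetic)
lemma sum_split (g : Nat → Int) (n i : Nat) (hi : i < n) :
    ∑ j ∈ Finset.range n, g j * |(i : Int) - (j : Int)|
    = (∑ k ∈ Finset.range i, ((i : Int) - (k : Int)) * g k)
      + (∑ k ∈ Finset.range (n - 1 - i), (((n - 1 - i : Nat) : Int) - (k : Int)) * g (n - 1 - k)) := by
  have hrefl : (∑ k ∈ Finset.range (n - 1 - i), (((n - 1 - i : Nat) : Int) - (k : Int)) * g (n - 1 - k))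
      = ∑ k ∈ Finset.range (n - 1 - i), ((k : Int) + 1) * g (i + 1 + k) := by
    rw [← Finset.sum_range_reflect]
    apply Finset.sum_congr rfl
    intro k hk
    have hk' : k < n - 1 - i := Finset.mem_range.mp hk
    have h1 : ((n - 1 - i : Nat) : Int) - ((n - 1 - i - 1 - k : Nat) : Int) = (k : Int) + 1 := by
      omega
    have h2 : n - 1 - (n - 1 - i - 1 - k) = i + 1 + k := by omega
    rw [h1, h2]
  rw [hrefl]
  have hsplit : ∑ j ∈ Finset.range n, g j * |(i : Int) - (j : Int)|
      = (∑ j ∈ Finset.range (i+1), g j * |(i : Int) - (j : Int)|)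
        + ∑ j ∈ Finset.Ico (i+1) n, g j * |(i : Int) - (j : Int)| := by
    rw [Finset.range_eq_Ico, ← Finset.sum_Ico_consecutive _ (by omega : 0 ≤ i+1) (by omega : i+1 ≤ n)]
  rw [hsplit, Finset.sum_range_succ]
  have hz : g i * |(i : Int) - (i : Int)| = 0 := by simp
  rw [hz, add_zero]
  congr 1
  · apply Finset.sum_congr rfl
    intro k hk
    have hk' : k < i := Finset.mem_range.mp hk
    have habs : |(i : Int) - (k : Int)| = (i : Int) - (k : Int) := abs_of_nonneg (by omega)
    rw [habs]; ring
  · rw [Finset.sum_Ico_eq_sum_range]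
    have hlen : n - (i+1) = n - 1 - i := by omega
    rw [hlen]
    apply Finset.sum_congr rfl
    intro k hk
    have hk' : k < n - 1 - i := Finset.mem_range.mp hk
    have h3 : |(i : Int) - ((i + 1 + k : Nat) : Int)| = (k : Int) + 1 := by
      rw [abs_of_nonpos (by push_cast; omega)]
      push_cast; ring
    rw [h3]; ring

lemma B_eq (boxes : String) :
    minOperations_alt boxes = (List.range boxes.toList.length).map (fun k => pvS boxes.toList k) := by
  unfold minOperations_alt
  apply List.ext_getElem
  · simp [passCosts_length]
  · intro i h1 h2
    have hi : i < boxes.toList.length := by simpa using h2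
    rw [List.getElem_zipWith, List.getElem_map, List.getElem_range, List.getElem_reverse]
    have hlt2 : boxes.toList.length - 1 - i < boxes.toList.reverse.length := by
      rw [List.length_reverse]; omega
    simp only [passCosts_length, List.length_reverse]
    rw [passCosts_getElem _ _ _ i hi]
    rw [passCosts_getElem _ _ _ _ hlt2]
    have hrevD : ∀ k, k < boxes.toList.length - 1 - i →
        boxes.toList.reverse.getD k '0' = boxes.toList.getD (boxes.toList.length - 1 - k) '0' := by
      intro k hk
      have hk1 : k < boxes.toList.reverse.length := by rw [List.length_reverse]; omega
      have hk2 : boxes.toList.length - 1 - k < boxes.toList.length := by omega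
      rw [List.getD_eq_getElem _ _ hk1, List.getD_eq_getElem _ _ hk2, List.getElem_reverse]
    have hsum2 : (∑ k ∈ Finset.range (boxes.toList.length - 1 - i),
          (((boxes.toList.length - 1 - i : Nat) : Int) - (k : Int)) * bc (boxes.toList.reverse.getD k '0'))
        = ∑ k ∈ Finset.range (boxes.toList.length - 1 - i),
          (((boxes.toList.length - 1 - i : Nat) : Int) - (k : Int)) * bc (boxes.toList.getD (boxes.toList.length - 1 - k) '0') := by
      apply Finset.sum_congr rfl
      intro k hk
      rw [hrevD k (Finset.mem_range.mp hk)]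
    rw [hsum2]
    unfold pvS
    rw [sum_split (fun k => bc (boxes.toList.getD k '0')) boxes.toList.length i hi]
    ring

-- ===== VERDICT (by name: the statement is the Claim_ definition above) =====
theorem minOperations_spec : Claim_equal_minOperations := by
  intro boxes _
  unfold Spec_minOperations
  rw [A_eq, B_eq]
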